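-- pv_equiv track=rewrite | github.com/KyrinZ/agfzb-CloudAppDevelopment_Capstone | functions/python/get-review.py | get_review
-- ===== SOURCE A (Python) =====
-- def get_review(raw_reviews_from_db):
--     reviews = [i['doc'] for i in raw_reviews_from_db]
--     result = []
--     fields = [
--         "id",
--         "dealership",
--         "name",
--         "purchase",
--         "review",
--         "purchase",
--         "purchase_date",
--         "car_make",
--         "car_model",
--         "car_year",
--     ]
--     for i in reviews:
--         result.append({k:v for k,v in i.items() if k in fields})
--     return result
-- ===== SOURCE B (Python) =====
-- FIELDS = {
--     "id",
--     "dealership",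
--     "name",
--     "purchase",
--     "review",
--     "purchase_date",
--     "car_make",
--     "car_model",
--     "car_year",
-- }
--
--
-- def get_review(raw_reviews_from_db):
--     # Stage 1: flatten every doc into (doc-index, key, value) triples.
--     triples = [
--         (idx, k, v)
--         for idx, item in enumerate(raw_reviews_from_db)
--         for k, v in item['doc'].items()
--     ]
--     # Stage 2: keep only the wanted fields.
--     kept = [t for t in triples if t[1] in FIELDS]
--     # Stage 3: regroup the surviving triples back into one dict per doc.
--     return [
--         {k: v for j, k, v in kept if j == idx}
--         for idx in range(len(raw_reviews_from_db))
--     ]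
-- ===== Notes on version B (the rewrite author's own statement) =====
-- stated objective: alternative
-- what changed: A filters each doc in place inside one loop; B is a staged pipeline that flattens all docs into (index, key, value) triples, filters the wanted fields globally in one pass, then regroups the surviving triples back into per-doc dicts by index.
import Mathlib
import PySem

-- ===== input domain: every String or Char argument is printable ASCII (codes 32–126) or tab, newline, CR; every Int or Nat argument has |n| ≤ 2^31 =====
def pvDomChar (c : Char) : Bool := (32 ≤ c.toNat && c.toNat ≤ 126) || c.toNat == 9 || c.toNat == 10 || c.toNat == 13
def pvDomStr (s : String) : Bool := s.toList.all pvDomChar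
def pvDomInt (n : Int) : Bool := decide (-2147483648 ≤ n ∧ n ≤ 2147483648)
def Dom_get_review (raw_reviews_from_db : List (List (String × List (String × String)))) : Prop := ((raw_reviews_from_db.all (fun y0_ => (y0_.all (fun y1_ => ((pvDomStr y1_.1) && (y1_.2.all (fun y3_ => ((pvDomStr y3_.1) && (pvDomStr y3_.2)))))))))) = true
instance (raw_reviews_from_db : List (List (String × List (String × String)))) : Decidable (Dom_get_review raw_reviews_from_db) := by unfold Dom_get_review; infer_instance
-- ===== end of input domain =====

-- B replaces A's per-doc comprehension filter by a three-stage pipeline: flatten all docs into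
-- (index, key, value) triples, filter the wanted fields globally, then regroup by index (alternative decomposition, same results).


-- ===== PORT A =====
-- A's fields list, duplicate "purchase" included
def pvFieldsA : List String :=
  ["id", "dealership", "name", "purchase", "review", "purchase", "purchase_date",
   "car_make", "car_model", "car_year"]

-- i['doc'] raises KeyError when absent: that case is excluded by Pre_; the port's default [] is never reached inside Pre_.
def get_review (raw_reviews_from_db : List (List (String × List (String × String)))) : List (List (String × String)) :=
  let reviews := raw_reviews_from_db.map (fun i => ((PySem.Dict.mk i).get? "doc").getD [])
  let result : List (List (String × String)) := []
  -- {k: v for k, v in i.items() if k in fields} : the doc is a Python dict (unique keys), so the comprehension is exactly a filter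
  reviews.foldl (fun result i => result ++ [i.filter (fun kv => pvFieldsA.contains kv.1)]) result

-- ===== PORT B =====
-- B's FIELDS set literal (membership only, so Set order is never consumed)
def pvFieldsB : PySem.Set String :=
  PySem.Set.ofList ["id", "dealership", "name", "purchase", "review", "purchase_date",
                    "car_make", "car_model", "car_year"]

def get_review_alt (raw_reviews_from_db : List (List (String × List (String × String)))) : List (List (String × String)) :=
  -- Stage 1: triples = [(idx, k, v) for idx, item in enumerate(raw) for k, v in item['doc'].items()]
  let triples := (PySem.List.enumerate raw_reviews_from_db 0).flatMap (fun p =>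
    (((PySem.Dict.mk p.2).get? "doc").getD []).map (fun kv => (p.1, kv.1, kv.2)))
  -- Stage 2: kept = [t for t in triples if t[1] in FIELDS]
  let kept := triples.filter (fun t => PySem.Set.contains pvFieldsB t.2.1)
  -- Stage 3: regroup — {k: v for j, k, v in kept if j == idx} for idx in range(len(raw));
  -- each doc is a Python dict (unique keys), so the dict comprehension is exactly the list of surviving pairs
  (PySem.List.pyRange 0 raw_reviews_from_db.length 1).map (fun idx =>
    (kept.filter (fun t => t.1 == idx)).map (fun t => t.2))

-- ===== PRECONDITION & SPEC =====
-- Pre_ excludes exactly the inputs where some item lacks the key "doc": there A raises KeyError.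
def Pre_get_review (raw_reviews_from_db : List (List (String × List (String × String)))) : Prop :=
  (raw_reviews_from_db.all (fun item => item.any (fun p => p.1 == "doc"))) = true
instance (raw_reviews_from_db : List (List (String × List (String × String)))) : Decidable (Pre_get_review raw_reviews_from_db) := by unfold Pre_get_review; infer_instance

def pvWitness_get_review : (List (List (String × List (String × String)))) :=
  [[("doc", [("id", "1"), ("junk", "x"), ("purchase", "y")])],
   [("extra", [("a", "b")]), ("doc", [])]]

def Spec_get_review (raw_reviews_from_db : List (List (String × List (String × String)))) (out : List (List (String × String))) : Prop := out = get_review_alt raw_reviews_from_db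
instance (raw_reviews_from_db : List (List (String × List (String × String)))) (out : List (List (String × String))) : Decidable (Spec_get_review raw_reviews_from_db out) := by unfold Spec_get_review; infer_instance

-- ===== CLAIM (what is proved, stated in full; the proofs are below) =====
def Claim_equal_get_review : Prop := ∀ (raw_reviews_from_db : List (List (String × List (String × String)))), Dom_get_review raw_reviews_from_db → Pre_get_review raw_reviews_from_db → Spec_get_review raw_reviews_from_db (get_review raw_reviews_from_db)

-- ===== LEMMAS AND PROOFS =====

-- the two membership tests agree (A's list has "purchase" twice; B's set once)
theorem pv_contains_eq (k : String) :
    PySem.Set.contains pvFieldsB k = pvFieldsA.contains k := by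
  have hB : pvFieldsB = ["id", "dealership", "name", "purchase", "review", "purchase_date",
                         "car_make", "car_model", "car_year"] := by decide
  rw [PySem.Set.contains_eq_listContains, hB]
  simp only [pvFieldsA, List.contains_cons, List.contains_nil]
  cases k == "purchase" <;> simp

-- the flattened triple stream, by structural recursion on the list of docs
def pvTrips : Int → List (List (String × String)) → List (Int × String × String)
  | _, [] => []
  | s, d :: ds => d.map (fun kv => (s, kv.1, kv.2)) ++ pvTrips (s + 1) ds

theorem pv_enumerate_flatMap (docOf : List (String × List (String × String)) → List (String × String)) :
    ∀ (raw : List (List (String × List (String × String)))) (s : Int),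
      (PySem.List.enumerate raw s).flatMap (fun p => (docOf p.2).map (fun kv => (p.1, kv.1, kv.2)))
        = pvTrips s (raw.map docOf) := by
  intro raw
  induction raw with
  | nil => intro s; rfl
  | cons x xs ih =>
    intro s
    rw [PySem.List.enumerate_cons]
    simp only [List.flatMap_cons, List.map_cons, pvTrips, ih]

theorem pv_trips_fst_ge : ∀ (ds : List (List (String × String))) (s : Int)
    (t : Int × String × String), t ∈ pvTrips s ds → s ≤ t.1 := by
  intro ds
  induction ds with
  | nil => intro s t ht; simp [pvTrips] at ht
  | cons d ds ih =>
    intro s t ht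
    rcases List.mem_append.mp ht with h | h
    · rcases List.mem_map.mp h with ⟨kv, _, rfl⟩; exact le_refl s
    · exact le_trans (by omega) (ih (s + 1) t h)

theorem pv_trips_select : ∀ (ds : List (List (String × String))) (s : Int) (j : Nat)
    (hj : j < ds.length),
    ((pvTrips s ds).filter (fun t => t.1 == s + (j : Int))).map (fun t => t.2) = ds[j] := by
  intro ds
  induction ds with
  | nil => intro s j hj; simp at hj
  | cons d ds ih =>
    intro s j hj
    cases j with
    | zero =>
      simp only [pvTrips, List.filter_append, List.map_append]
      have h1 : (d.map (fun kv => (s, kv.1, kv.2))).filter (fun t => t.1 == s + ((0 : Nat) : Int))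
          = d.map (fun kv => (s, kv.1, kv.2)) := by
        apply List.filter_eq_self.mpr
        intro t ht
        rcases List.mem_map.mp ht with ⟨kv, _, rfl⟩
        simp
      have h2 : (pvTrips (s + 1) ds).filter (fun t => t.1 == s + ((0 : Nat) : Int)) = [] := by
        apply List.filter_eq_nil_iff.mpr
        intro t ht
        have := pv_trips_fst_ge ds (s + 1) t ht
        simp only [beq_iff_eq]
        omega
      rw [h1, h2]
      simp [List.map_map]
    | succ j =>
      simp only [pvTrips, List.filter_append, List.map_append]
      have h1 : (d.map (fun kv => (s, kv.1, kv.2))).filter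
          (fun t => t.1 == s + ((j + 1 : Nat) : Int)) = [] := by
        apply List.filter_eq_nil_iff.mpr
        intro t ht
        rcases List.mem_map.mp ht with ⟨kv, _, rfl⟩
        simp only [beq_iff_eq]
        omega
      have h2 : s + ((j + 1 : Nat) : Int) = (s + 1) + (j : Int) := by push_cast; ring
      rw [h1, h2, ih (s + 1) j (by simpa using hj)]
      simp

-- ===== VERDICT (by name: the statement is the Claim_ definition above) =====
theorem get_review_spec : Claim_equal_get_review := by
  intro raw _ _
  unfold Spec_get_review get_review get_review_alt
  rw [PySem.List.foldl_append_singleton_eq_map,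
      pv_enumerate_flatMap (fun i => ((PySem.Dict.mk i).get? "doc").getD []) raw 0]
  set docs := raw.map (fun i => ((PySem.Dict.mk i).get? "doc").getD []) with hdocs
  have hlen : docs.length = raw.length := by simp [hdocs]
  apply List.ext_getElem
  · simp [hlen]
  · intro k hk1 hk2
    have hkn : k < raw.length := by simpa using hk2
    have hkd : k < docs.length := by omega
    simp only [List.nil_append, List.getElem_map]
    rw [PySem.List.getElem_pyRange_one, List.filter_filter]
    have hcomm : (pvTrips 0 docs).filter
        (fun t => (t.1 == (0 : Int) + (k : Int)) && PySem.Set.contains pvFieldsB t.2.1)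
        = ((pvTrips 0 docs).filter (fun t => t.1 == (0 : Int) + (k : Int))).filter
            (fun t => PySem.Set.contains pvFieldsB t.2.1) := by
      rw [List.filter_filter]
      apply List.filter_congr
      intro t _
      cases h1 : (t.1 == (0 : Int) + (k : Int)) <;>
        cases h2 : PySem.Set.contains pvFieldsB t.2.1 <;> simp_all
    rw [hcomm]
    have hpf : (fun t : Int × String × String => PySem.Set.contains pvFieldsB t.2.1)
        = ((fun kv : String × String => PySem.Set.contains pvFieldsB kv.1) ∘ (fun t : Int × String × String => t.2)) := rfl
    rw [hpf, ← List.filter_map, pv_trips_select docs 0 k hkd]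
    have hdk : docs[k] = ((PySem.Dict.mk raw[k]).get? "doc").getD [] := by
      simp [hdocs]
    rw [hdk]
    apply List.filter_congr
    intro kv _
    exact (pv_contains_eq kv.1).symm
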